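-- pv_equiv track=rewrite | github.com/greb/aoc2019 | days/day12.py | time_step
-- ===== SOURCE A (Python) =====
-- def cmp(a,b):
--     return int(b>a) - int(b<a)
--
-- def time_step(axis):
--     new_axis = []
--     for i, (p, v) in enumerate(axis):
--         for j, (p1,_) in enumerate(axis):
--             if i == j:
--                 continue
--             v += cmp(p, p1)
--         p += v
--         new_axis.append((p, v))
--     return tuple(new_axis)
-- ===== SOURCE B (Python) =====
-- def _bisect_left(a, x, lo, hi):
--     if lo >= hi:
--         return lo
--     mid = (lo + hi) // 2
--     if a[mid] < x:
--         return _bisect_left(a, x, mid + 1, hi)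
--     return _bisect_left(a, x, lo, mid)
--
-- def _bisect_right(a, x, lo, hi):
--     if lo >= hi:
--         return lo
--     mid = (lo + hi) // 2
--     if a[mid] <= x:
--         return _bisect_right(a, x, mid + 1, hi)
--     return _bisect_right(a, x, lo, mid)
--
-- def time_step(axis):
--     ps = sorted(p for p, _ in axis)
--     n = len(ps)
--     new_axis = []
--     for p, v in axis:
--         w = v + (n - _bisect_right(ps, p, 0, n)) - _bisect_left(ps, p, 0, n)
--         new_axis.append((p + w, w))
--     return tuple(new_axis)
-- ===== Notes on version B (the rewrite author's own statement) =====
-- stated objective: faster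
-- what changed: Replaces the O(n^2) all-pairs cmp accumulation with one sort of the positions plus two binary searches per moon: the velocity delta is (count of strictly greater positions) - (count of strictly smaller positions), read off as (n - bisect_right) - bisect_left on the sorted positions (binary search hand-written since A imports nothing).
import Mathlib
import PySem

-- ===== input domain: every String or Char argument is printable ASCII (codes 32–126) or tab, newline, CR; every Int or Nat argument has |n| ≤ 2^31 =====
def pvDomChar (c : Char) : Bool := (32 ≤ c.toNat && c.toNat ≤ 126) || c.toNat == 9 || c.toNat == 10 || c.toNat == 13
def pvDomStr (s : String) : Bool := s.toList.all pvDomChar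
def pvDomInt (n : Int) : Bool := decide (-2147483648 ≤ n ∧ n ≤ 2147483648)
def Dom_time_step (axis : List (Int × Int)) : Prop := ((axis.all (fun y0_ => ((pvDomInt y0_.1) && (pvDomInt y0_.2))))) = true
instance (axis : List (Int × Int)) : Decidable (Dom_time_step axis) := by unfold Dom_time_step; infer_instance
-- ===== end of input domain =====

-- B replaces A's O(n^2) all-pairs cmp accumulation by one sort of the positions plus two
-- hand-written binary searches per moon (velocity delta = greater-count minus smaller-count).

-- ===== PORT A =====
def pyCmp (a b : Int) : Int := (if b > a then 1 else 0) - (if b < a then 1 else 0)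

def time_step (axis : List (Int × Int)) : List (Int × Int) :=
  (PySem.List.enumerate axis 0).foldl (fun new_axis iv =>
    let i := iv.1
    let p := iv.2.1
    let v := (PySem.List.enumerate axis 0).foldl (fun v jv =>
      if i == jv.1 then v else v + pyCmp p jv.2.1) iv.2.2
    new_axis ++ [(p + v, v)]) []

-- ===== PORT B =====
-- hand-written recursive bisect from Source B; a[mid] is always in range at every call site
-- (0 ≤ lo ≤ mid < hi ≤ len a), so List.getD is exact there
def bisectLGo (a : List Int) (x : Int) (fuel lo hi : Nat) : Nat :=
  match fuel with
  | 0 => lo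
  | fuel + 1 =>
    if lo < hi then
      let mid := (lo + hi) / 2
      if a.getD mid 0 < x then bisectLGo a x fuel (mid + 1) hi
      else bisectLGo a x fuel lo mid
    else lo

-- fuel = hi - lo bounds the recursion depth; it only makes the search structural
def bisectL (a : List Int) (x : Int) (lo hi : Nat) : Nat := bisectLGo a x (hi - lo) lo hi

def bisectRGo (a : List Int) (x : Int) (fuel lo hi : Nat) : Nat :=
  match fuel with
  | 0 => lo
  | fuel + 1 =>
    if lo < hi then
      let mid := (lo + hi) / 2
      if a.getD mid 0 ≤ x then bisectRGo a x fuel (mid + 1) hi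
      else bisectRGo a x fuel lo mid
    else lo

def bisectR (a : List Int) (x : Int) (lo hi : Nat) : Nat := bisectRGo a x (hi - lo) lo hi

def time_step_alt (axis : List (Int × Int)) : List (Int × Int) :=
  let ps := PySem.List.sorted (axis.map (fun pv => pv.1)) (fun x => x) false
  let n := ps.length
  axis.foldl (fun new_axis pv =>
    let p := pv.1
    let w := pv.2 + ((n - bisectR ps p 0 n : Nat) : Int) - ((bisectL ps p 0 n : Nat) : Int)
    new_axis ++ [(p + w, w)]) []

-- ===== PRECONDITION & SPEC =====
def Spec_time_step (axis : List (Int × Int)) (out : List (Int × Int)) : Prop := out = time_step_alt axis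
instance (axis : List (Int × Int)) (out : List (Int × Int)) : Decidable (Spec_time_step axis out) := by unfold Spec_time_step; infer_instance

-- ===== CLAIM (what is proved, stated in full; the proofs are below) =====
def Claim_equal_time_step : Prop := ∀ (axis : List (Int × Int)), Dom_time_step axis → Spec_time_step axis (time_step axis)

-- ===== LEMMAS AND PROOFS =====

-- entries of enumerate are (index, element at that index)
theorem mem_enumerate_eq {α : Type} {xs : List α} {s : Int} {jv : Int × α}
    (h : jv ∈ PySem.List.enumerate xs s) :
    ∃ k : Nat, ∃ hk : k < xs.length, jv.1 = s + k ∧ jv.2 = xs[k] := by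
  induction xs generalizing s with
  | nil => simp [PySem.List.enumerate_nil] at h
  | cons y t ih =>
    rw [PySem.List.enumerate_cons] at h
    rcases List.mem_cons.mp h with h | h
    · exact ⟨0, by simp, by simp [h], by simp [h]⟩
    · obtain ⟨k, hk, h1, h2⟩ := ih h
      exact ⟨k + 1, by simpa using hk, by push_cast at h1 ⊢; omega, by simpa using h2⟩

theorem getElem_enumerate {α : Type} (xs : List α) (s : Int) (k : Nat) (hk : k < xs.length) :
    (PySem.List.enumerate xs s)[k]'(by simpa [PySem.List.length_enumerate] using hk) = (s + k, xs[k]) := by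
  induction xs generalizing s k with
  | nil => simp at hk
  | cons y t ih =>
    cases k with
    | zero => simp [PySem.List.enumerate_cons]
    | succ m =>
      have := ih (s + 1) m (by simpa using hk)
      simp [PySem.List.enumerate_cons, this]
      omega

-- a position r that separates p-satisfying prefix from the rest is the countP
theorem countP_eq_of_split (p : Int → Bool) (a : List Int) (r : Nat) (hr : r ≤ a.length)
    (h : ∀ j : Nat, ∀ hj : j < a.length, (j < r ↔ p a[j])) : a.countP p = r := by
  induction a generalizing r with
  | nil => simp at hr ⊢; omega
  | cons y t ih =>
    cases r with
    | zero =>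
      have h0 : ∀ x ∈ y :: t, ¬ p x := by
        intro x hx
        obtain ⟨k, hk, rfl⟩ := List.getElem_of_mem hx
        exact fun hp => absurd ((h k hk).mpr hp) (by omega)
      simpa using List.countP_eq_zero.mpr h0
    | succ r' =>
      have hy : p y := (h 0 (by simp)).mp (by omega)
      have ht : t.countP p = r' := by
        apply ih r' (by simpa using hr)
        intro j hj
        have := h (j + 1) (by simpa using hj)
        simpa using this
      simp [hy, ht]

theorem bisectLGo_spec (a : List Int) (x : Int) (hs : a.Pairwise (· ≤ ·)) (fuel : Nat) :
    ∀ lo hi : Nat, hi - lo ≤ fuel → lo ≤ hi → hi ≤ a.length →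
      (∀ j : Nat, j < lo → a.getD j 0 < x) →
      (∀ j : Nat, hi ≤ j → j < a.length → ¬ a.getD j 0 < x) →
      bisectLGo a x fuel lo hi ≤ a.length ∧
        ∀ j : Nat, ∀ hj : j < a.length, (j < bisectLGo a x fuel lo hi ↔ a[j] < x) := by
  induction fuel with
  | zero =>
    intro lo hi hfuel hlo hhi hL hR
    simp only [bisectLGo]
    refine ⟨by omega, ?_⟩
    intro j hj
    constructor
    · intro hjlo
      have := hL j hjlo
      rwa [List.getD_eq_getElem a 0 hj] at this
    · intro hax
      by_contra hn
      have := hR j (by omega) hj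
      rw [List.getD_eq_getElem a 0 hj] at this
      exact this hax
  | succ fuel ih =>
    intro lo hi hfuel hlo hhi hL hR
    simp only [bisectLGo]
    split
    · next h =>
      split
      · next hlt =>
        refine ih ((lo + hi) / 2 + 1) hi (by omega) (by omega) hhi ?_ hR
        intro j hj
        have hjlen : j < a.length := by omega
        rw [List.getD_eq_getElem a 0 hjlen]
        have hm : a[j] ≤ a[(lo + hi) / 2]'(by omega) := by
          rcases Nat.lt_or_ge j ((lo + hi) / 2) with hc | hc
          · exact List.pairwise_iff_getElem.mp hs j _ hjlen (by omega) hc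
          · have : j = (lo + hi) / 2 := by omega
            subst this; exact le_refl _
        have hx : a[(lo + hi) / 2]'(by omega) < x := by
          rwa [List.getD_eq_getElem a 0 (by omega)] at hlt
        exact lt_of_le_of_lt hm hx
      · next hlt =>
        refine ih lo ((lo + hi) / 2) (by omega) (by omega) (by omega) hL ?_
        intro j hj hjlen
        rw [List.getD_eq_getElem a 0 hjlen]
        have hm : a[(lo + hi) / 2]'(by omega) ≤ a[j] := by
          rcases Nat.lt_or_ge ((lo + hi) / 2) j with hc | hc
          · exact List.pairwise_iff_getElem.mp hs _ j (by omega) hjlen hc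
          · have : (lo + hi) / 2 = j := by omega
            subst this; exact le_refl _
        have hx : ¬ a[(lo + hi) / 2]'(by omega) < x := by
          rwa [List.getD_eq_getElem a 0 (by omega)] at hlt
        omega
    · next h =>
      refine ⟨by omega, ?_⟩
      intro j hj
      constructor
      · intro hjlo
        have := hL j hjlo
        rwa [List.getD_eq_getElem a 0 hj] at this
      · intro hax
        by_contra hn
        have := hR j (by omega) hj
        rw [List.getD_eq_getElem a 0 hj] at this
        exact this hax

theorem bisectL_spec (a : List Int) (x : Int) (hs : a.Pairwise (· ≤ ·)) (lo hi : Nat)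
    (hlo : lo ≤ hi) (hhi : hi ≤ a.length)
    (hL : ∀ j : Nat, j < lo → a.getD j 0 < x)
    (hR : ∀ j : Nat, hi ≤ j → j < a.length → ¬ a.getD j 0 < x) :
    bisectL a x lo hi ≤ a.length ∧
      ∀ j : Nat, ∀ hj : j < a.length, (j < bisectL a x lo hi ↔ a[j] < x) :=
  bisectLGo_spec a x hs (hi - lo) lo hi (le_refl _) hlo hhi hL hR

theorem bisectRGo_spec (a : List Int) (x : Int) (hs : a.Pairwise (· ≤ ·)) (fuel : Nat) :
    ∀ lo hi : Nat, hi - lo ≤ fuel → lo ≤ hi → hi ≤ a.length →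
      (∀ j : Nat, j < lo → a.getD j 0 ≤ x) →
      (∀ j : Nat, hi ≤ j → j < a.length → ¬ a.getD j 0 ≤ x) →
      bisectRGo a x fuel lo hi ≤ a.length ∧
        ∀ j : Nat, ∀ hj : j < a.length, (j < bisectRGo a x fuel lo hi ↔ a[j] ≤ x) := by
  induction fuel with
  | zero =>
    intro lo hi hfuel hlo hhi hL hR
    simp only [bisectRGo]
    refine ⟨by omega, ?_⟩
    intro j hj
    constructor
    · intro hjlo
      have := hL j hjlo
      rwa [List.getD_eq_getElem a 0 hj] at this
    · intro hax
      by_contra hn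
      have := hR j (by omega) hj
      rw [List.getD_eq_getElem a 0 hj] at this
      exact this hax
  | succ fuel ih =>
    intro lo hi hfuel hlo hhi hL hR
    simp only [bisectRGo]
    split
    · next h =>
      split
      · next hlt =>
        refine ih ((lo + hi) / 2 + 1) hi (by omega) (by omega) hhi ?_ hR
        intro j hj
        have hjlen : j < a.length := by omega
        rw [List.getD_eq_getElem a 0 hjlen]
        have hm : a[j] ≤ a[(lo + hi) / 2]'(by omega) := by
          rcases Nat.lt_or_ge j ((lo + hi) / 2) with hc | hc
          · exact List.pairwise_iff_getElem.mp hs j _ hjlen (by omega) hc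
          · have : j = (lo + hi) / 2 := by omega
            subst this; exact le_refl _
        have hx : a[(lo + hi) / 2]'(by omega) ≤ x := by
          rwa [List.getD_eq_getElem a 0 (by omega)] at hlt
        omega
      · next hlt =>
        refine ih lo ((lo + hi) / 2) (by omega) (by omega) (by omega) hL ?_
        intro j hj hjlen
        rw [List.getD_eq_getElem a 0 hjlen]
        have hm : a[(lo + hi) / 2]'(by omega) ≤ a[j] := by
          rcases Nat.lt_or_ge ((lo + hi) / 2) j with hc | hc
          · exact List.pairwise_iff_getElem.mp hs _ j (by omega) hjlen hc
          · have : (lo + hi) / 2 = j := by omega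
            subst this; exact le_refl _
        have hx : ¬ a[(lo + hi) / 2]'(by omega) ≤ x := by
          rwa [List.getD_eq_getElem a 0 (by omega)] at hlt
        omega
    · next h =>
      refine ⟨by omega, ?_⟩
      intro j hj
      constructor
      · intro hjlo
        have := hL j hjlo
        rwa [List.getD_eq_getElem a 0 hj] at this
      · intro hax
        by_contra hn
        have := hR j (by omega) hj
        rw [List.getD_eq_getElem a 0 hj] at this
        exact this hax

theorem bisectR_spec (a : List Int) (x : Int) (hs : a.Pairwise (· ≤ ·)) (lo hi : Nat)
    (hlo : lo ≤ hi) (hhi : hi ≤ a.length)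
    (hL : ∀ j : Nat, j < lo → a.getD j 0 ≤ x)
    (hR : ∀ j : Nat, hi ≤ j → j < a.length → ¬ a.getD j 0 ≤ x) :
    bisectR a x lo hi ≤ a.length ∧
      ∀ j : Nat, ∀ hj : j < a.length, (j < bisectR a x lo hi ↔ a[j] ≤ x) :=
  bisectRGo_spec a x hs (hi - lo) lo hi (le_refl _) hlo hhi hL hR

-- proof-only helpers: the per-element values of the two folds
def innerA (axis : List (Int × Int)) (iv : Int × (Int × Int)) : Int :=
  (PySem.List.enumerate axis 0).foldl
    (fun v jv => if iv.1 == jv.1 then v else v + pyCmp iv.2.1 jv.2.1) iv.2.2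

def spsOf (axis : List (Int × Int)) : List Int :=
  PySem.List.sorted (axis.map (fun pv => pv.1)) (fun x => x) false

def wB (axis : List (Int × Int)) (pv : Int × Int) : Int :=
  pv.2 + (((spsOf axis).length - bisectR (spsOf axis) pv.1 0 (spsOf axis).length : Nat) : Int)
       - ((bisectL (spsOf axis) pv.1 0 (spsOf axis).length : Nat) : Int)

theorem sum_pyCmp (l : List Int) (p : Int) :
    (l.map (fun q => pyCmp p q)).sum
      = (l.countP (fun q => decide (p < q)) : Int) - (l.countP (fun q => decide (q < p)) : Int) := by
  induction l with
  | nil => simp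
  | cons y t ih =>
    simp only [List.map_cons, List.sum_cons, ih, List.countP_cons]
    by_cases h1 : p < y <;> by_cases h2 : y < p <;>
      simp [pyCmp, h1, h2] <;> omega

-- the two bisect calls of B compute the strict counts over the position multiset
theorem counts_bisect (axis : List (Int × Int)) (p : Int) :
    ((bisectL (spsOf axis) p 0 (spsOf axis).length : Nat) : Int)
        = ((axis.map (fun pv => pv.1)).countP (fun q => decide (q < p)) : Int) ∧
    (((spsOf axis).length - bisectR (spsOf axis) p 0 (spsOf axis).length : Nat) : Int)
        = ((axis.map (fun pv => pv.1)).countP (fun q => decide (p < q)) : Int) := by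
  have hpair : (spsOf axis).Pairwise (· ≤ ·) := by
    unfold spsOf; exact PySem.List.sorted_pairwise _ _
  have hperm : (spsOf axis).Perm (axis.map (fun pv => pv.1)) := by
    unfold spsOf; exact PySem.List.sorted_perm _ _ _
  obtain ⟨hrL, hLiff⟩ := bisectL_spec (spsOf axis) p hpair 0 (spsOf axis).length
    (by omega) (le_refl _) (fun j hj => absurd hj (Nat.not_lt_zero j))
    (fun j h1 h2 => absurd h2 (by omega))
  obtain ⟨hrR, hRiff⟩ := bisectR_spec (spsOf axis) p hpair 0 (spsOf axis).length
    (by omega) (le_refl _) (fun j hj => absurd hj (Nat.not_lt_zero j))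
    (fun j h1 h2 => absurd h2 (by omega))
  have hcl : (spsOf axis).countP (fun q => decide (q < p)) = bisectL (spsOf axis) p 0 (spsOf axis).length :=
    countP_eq_of_split _ _ _ hrL (by intro j hj; simpa using hLiff j hj)
  have hcr : (spsOf axis).countP (fun q => decide (q ≤ p)) = bisectR (spsOf axis) p 0 (spsOf axis).length :=
    countP_eq_of_split _ _ _ hrR (by intro j hj; simpa using hRiff j hj)
  have hlen := List.length_eq_countP_add_countP (fun q => decide (q ≤ p)) (l := spsOf axis)
  have hnot : (spsOf axis).countP (fun a => decide ¬(decide (a ≤ p) = true))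
      = (spsOf axis).countP (fun q => decide (p < q)) := by
    apply List.countP_congr
    intro a _
    simp [not_le]
  have hpl := List.Perm.countP_eq (fun q => decide (q < p)) hperm
  have hpg := List.Perm.countP_eq (fun q => decide (p < q)) hperm
  constructor
  · rw [← hcl, hpl]
  · rw [← hpg, ← hnot]
    omega

theorem inner_eq (axis : List (Int × Int)) (k : Nat) (hk : k < axis.length) :
    innerA axis ((k : Int), axis[k]) = wB axis axis[k] := by
  unfold innerA
  have hcongr : ∀ (acc : Int), ∀ jv ∈ PySem.List.enumerate axis 0,
      (if ((k : Int), axis[k]).1 == jv.1 then acc else acc + pyCmp ((k : Int), axis[k]).2.1 jv.2.1)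
        = acc + pyCmp axis[k].1 jv.2.1 := by
    intro acc jv hjv
    obtain ⟨m, hm, hfst, hsnd⟩ := mem_enumerate_eq hjv
    by_cases hkm : (k : Int) = jv.1
    · have hmm : m = k := by rw [hfst] at hkm; omega
      have hp : jv.2.1 = axis[k].1 := by subst hmm; rw [hsnd]
      simp [hkm, hp, pyCmp]
    · simp [hkm]
  rw [PySem.List.foldl_congr_mem _ _ _ _ hcongr, PySem.List.foldl_add]
  have hmap : ∀ K : Int, (PySem.List.enumerate axis 0).map (fun jv => pyCmp K jv.2.1)
      = (axis.map (fun pv => pv.1)).map (fun q => pyCmp K q) := by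
    intro K
    conv_rhs => rw [← PySem.List.map_snd_enumerate axis 0]
    rw [List.map_map, List.map_map]
    rfl
  rw [hmap, sum_pyCmp]
  obtain ⟨hbl, hbr⟩ := counts_bisect axis axis[k].1
  unfold wB
  rw [hbl, hbr]
  ring

-- ===== VERDICT (by name: the statement is the Claim_ definition above) =====
theorem time_step_spec : Claim_equal_time_step := by
  intro axis _hdom
  unfold Spec_time_step
  have hA : time_step axis
      = (PySem.List.enumerate axis 0).map (fun iv => (iv.2.1 + innerA axis iv, innerA axis iv)) := by
    show (PySem.List.enumerate axis 0).foldl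
        (fun acc iv => acc ++ [(iv.2.1 + innerA axis iv, innerA axis iv)]) [] = _
    rw [PySem.List.foldl_append_singleton_eq_map]
    simp
  have hB : time_step_alt axis = axis.map (fun pv => (pv.1 + wB axis pv, wB axis pv)) := by
    show axis.foldl (fun acc pv => acc ++ [(pv.1 + wB axis pv, wB axis pv)]) [] = _
    rw [PySem.List.foldl_append_singleton_eq_map]
    simp
  rw [hA, hB]
  apply List.ext_getElem
  · simp [PySem.List.length_enumerate]
  · intro k h1 h2
    have hk : k < axis.length := by simpa [PySem.List.length_enumerate] using h1
    simp only [List.getElem_map]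
    rw [getElem_enumerate axis 0 k hk]
    have h0 : ((0 : Int) + (k : Int), axis[k]) = ((k : Int), axis[k]) := by norm_num
    rw [h0, inner_eq axis k hk]
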